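-- pv_equiv track=rewrite | github.com/YG15/cards-war-simulation | src/main.py | tie
-- ===== SOURCE A (Python) =====
-- def tie_win(wining_deck, losing_deck, tie_loc):
--     wining_cards = wining_deck[:tie_loc+1] if len(wining_deck) > tie_loc else wining_deck
--     losing_cards = losing_deck[:tie_loc+1] if len(losing_deck) > tie_loc else losing_deck
--     losing_deck = losing_deck[len(losing_cards):]
--     wining_deck = wining_deck[len(wining_cards):] + wining_cards + losing_cards
--     return wining_deck, losing_deck
--
-- def tie(player1_deck, player2_deck, recursion_num):
--     tie_loc = 3 + (recursion_num * 3)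
--     player1_tie_card = player1_deck[tie_loc] if len(player1_deck) > tie_loc else player1_deck[-1]
--     player2_tie_card = player2_deck[tie_loc] if len(player2_deck) > tie_loc else player2_deck[-1]
--     if player1_tie_card > player2_tie_card:  # first player win
--         player1_deck, player2_deck = tie_win(player1_deck, player2_deck, tie_loc)
--     elif player1_tie_card < player2_tie_card:  # Second player win
--         player2_deck, player1_deck = tie_win(player2_deck, player1_deck, tie_loc)
--     else:  # tie
--         recursion_num += 1
--         # if recursion_num * 3 > min(len(player1_deck), len(player2_deck)):
--         #     shuffle(player1_deck)
--         #     shuffle(player2_deck)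
--         player1_deck, player2_deck = tie(player1_deck, player2_deck, recursion_num=recursion_num)
--     return player1_deck, player2_deck
-- ===== SOURCE B (Python) =====
-- def tie(player1_deck, player2_deck, recursion_num):
--     loc = 3 + recursion_num * 3
--
--     def card(deck):
--         return deck[loc] if len(deck) > loc else deck[-1]
--
--     c1, c2 = card(player1_deck), card(player2_deck)
--     while c1 == c2:
--         loc += 3
--         c1, c2 = card(player1_deck), card(player2_deck)
--     win, lose = (player1_deck, player2_deck) if c1 > c2 else (player2_deck, player1_deck)
--     taken = win[:loc + 1]
--     spoils = lose[:loc + 1]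
--     new_win = win[len(taken):] + taken + spoils
--     new_lose = lose[len(spoils):]
--     return (new_win, new_lose) if c1 > c2 else (new_lose, new_win)
-- ===== Notes on version B (the rewrite author's own statement) =====
-- stated objective: simpler
-- what changed: B replaces A's recursion (and its tie_win helper with conditional slicing) by a single iterative while-loop that advances the tie position until the tie cards differ, then settles the pot once with plain unconditional slices.
import Mathlib
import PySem

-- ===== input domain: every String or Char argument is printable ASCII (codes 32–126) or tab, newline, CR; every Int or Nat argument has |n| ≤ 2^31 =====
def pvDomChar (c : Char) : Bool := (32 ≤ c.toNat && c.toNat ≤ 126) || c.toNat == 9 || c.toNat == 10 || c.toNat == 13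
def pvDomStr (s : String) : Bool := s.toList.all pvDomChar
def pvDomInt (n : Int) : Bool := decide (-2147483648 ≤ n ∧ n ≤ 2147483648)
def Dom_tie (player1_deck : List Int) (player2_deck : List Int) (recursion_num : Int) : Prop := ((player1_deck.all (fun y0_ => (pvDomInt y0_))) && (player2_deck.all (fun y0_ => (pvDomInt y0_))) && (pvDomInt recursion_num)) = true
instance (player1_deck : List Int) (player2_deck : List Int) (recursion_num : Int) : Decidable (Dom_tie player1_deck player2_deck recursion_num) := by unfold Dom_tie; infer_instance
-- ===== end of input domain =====

-- B resolves the war tie with an iterative while-loop and one unconditional-slice settlement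
-- instead of A's recursion plus the tie_win helper; same cost, plainer control flow (objective: simpler).


-- shared card read: d[loc] if len(d) > loc else d[-1]  (both Python sources contain exactly this
-- expression; pyGetD's default 0 is never reached inside Pre_tie)
def tieCard (d : List Int) (loc : Int) : Int :=
  if (d.length : Int) > loc then PySem.List.pyGetD d loc 0 else PySem.List.pyGetD d (-1) 0

-- ===== PORT A =====
def tie_win (wining_deck : List Int) (losing_deck : List Int) (tie_loc : Int) : List Int × List Int :=
  let wining_cards := if (wining_deck.length : Int) > tie_loc then PySem.List.slice wining_deck none (some (tie_loc + 1)) else wining_deck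
  let losing_cards := if (losing_deck.length : Int) > tie_loc then PySem.List.slice losing_deck none (some (tie_loc + 1)) else losing_deck
  let losing_deck2 := PySem.List.slice losing_deck (some (losing_cards.length : Int)) none
  let wining_deck2 := PySem.List.slice wining_deck (some (wining_cards.length : Int)) none ++ wining_cards ++ losing_cards
  (wining_deck2, losing_deck2)

-- A's recursion, with an explicit fuel guard to make it total (the fuel is never exhausted inside Pre_tie)
def tieGo : Nat → List Int → List Int → Int → List Int × List Int
  | 0, player1_deck, player2_deck, _ => (player1_deck, player2_deck)
  | fuel + 1, player1_deck, player2_deck, recursion_num =>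
    let tie_loc := 3 + recursion_num * 3
    let player1_tie_card := tieCard player1_deck tie_loc
    let player2_tie_card := tieCard player2_deck tie_loc
    if player1_tie_card > player2_tie_card then
      tie_win player1_deck player2_deck tie_loc
    else if player1_tie_card < player2_tie_card then
      let r := tie_win player2_deck player1_deck tie_loc
      (r.2, r.1)
    else
      tieGo fuel player1_deck player2_deck (recursion_num + 1)

def tie (player1_deck : List Int) (player2_deck : List Int) (recursion_num : Int) : List Int × List Int :=
  tieGo (player1_deck.length + player2_deck.length + 1) player1_deck player2_deck recursion_num

-- ===== PORT B =====
-- B's while-loop: advance loc by 3 while the two tie cards agree (fuel guard for totality only)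
def tieFindLoc : Nat → List Int → List Int → Int → Int
  | 0, _, _, loc => loc
  | fuel + 1, p1, p2, loc =>
    if tieCard p1 loc = tieCard p2 loc then tieFindLoc fuel p1 p2 (loc + 3) else loc

-- B's settlement after the loop: plain slices, no conditionals on deck length
def tieSettle (p1 : List Int) (p2 : List Int) (loc : Int) : List Int × List Int :=
  let c1 := tieCard p1 loc
  let c2 := tieCard p2 loc
  let win := if c1 > c2 then p1 else p2
  let lose := if c1 > c2 then p2 else p1
  let taken := PySem.List.slice win none (some (loc + 1))
  let spoils := PySem.List.slice lose none (some (loc + 1))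
  let new_win := PySem.List.slice win (some (taken.length : Int)) none ++ taken ++ spoils
  let new_lose := PySem.List.slice lose (some (spoils.length : Int)) none
  if c1 > c2 then (new_win, new_lose) else (new_lose, new_win)

def tie_alt (player1_deck : List Int) (player2_deck : List Int) (recursion_num : Int) : List Int × List Int :=
  tieSettle player1_deck player2_deck
    (tieFindLoc (player1_deck.length + player2_deck.length + 1) player1_deck player2_deck
      (3 + recursion_num * 3))

-- ===== PRECONDITION & SPEC =====
-- Pre_tie admits exactly the inputs on which Python A returns: both decks nonempty and the first
-- tie position in range (else IndexError), and some reachable tie position where the two tie cards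
-- differ (else A recurses forever / RecursionError); once the position passes both deck lengths the
-- cards are the constant last elements, so a difference, if any, occurs within len1+len2+1 steps.
def Pre_tie (player1_deck : List Int) (player2_deck : List Int) (recursion_num : Int) : Prop :=
  player1_deck ≠ [] ∧ player2_deck ≠ [] ∧
  -(min (player1_deck.length : Int) (player2_deck.length : Int)) ≤ 3 + recursion_num * 3 ∧
  ∃ n < player1_deck.length + player2_deck.length + 1,
    tieCard player1_deck (3 + (recursion_num + n) * 3) ≠ tieCard player2_deck (3 + (recursion_num + n) * 3)
instance (player1_deck : List Int) (player2_deck : List Int) (recursion_num : Int) : Decidable (Pre_tie player1_deck player2_deck recursion_num) := by unfold Pre_tie; infer_instance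

def pvWitness_tie : List Int × List Int × Int := ([3, 2, 1, 1, 7], [3, 2, 1, 1, 5], 0)

def Spec_tie (player1_deck : List Int) (player2_deck : List Int) (recursion_num : Int) (out : List Int × List Int) : Prop := out = tie_alt player1_deck player2_deck recursion_num
instance (player1_deck : List Int) (player2_deck : List Int) (recursion_num : Int) (out : List Int × List Int) : Decidable (Spec_tie player1_deck player2_deck recursion_num out) := by unfold Spec_tie; infer_instance

-- ===== CLAIM (what is proved, stated in full; the proofs are below) =====
def Claim_equal_tie : Prop := ∀ (player1_deck : List Int) (player2_deck : List Int) (recursion_num : Int), Dom_tie player1_deck player2_deck recursion_num → Pre_tie player1_deck player2_deck recursion_num → Spec_tie player1_deck player2_deck recursion_num (tie player1_deck player2_deck recursion_num)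

-- ===== LEMMAS AND PROOFS =====

-- xs[:b] for b ≥ len(xs) is xs, so A's length-conditional slice equals B's plain slice
lemma condSlice_eq (xs : List Int) (loc : Int) :
    (if (xs.length : Int) > loc then PySem.List.slice xs none (some (loc + 1)) else xs)
      = PySem.List.slice xs none (some (loc + 1)) := by
  split_ifs with h
  · rfl
  · have h0 : 0 ≤ loc + 1 := by omega
    have : loc + 1 = ((loc + 1).toNat : Int) := by omega
    rw [this, PySem.List.slice_to_natCast]
    rw [List.take_of_length_le (by omega)]

-- A's tie_win equals B's settlement slices (for the winner/loser order already fixed)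
lemma tie_win_eq (w l : List Int) (loc : Int) :
    tie_win w l loc =
      (PySem.List.slice w (some (((PySem.List.slice w none (some (loc + 1))).length : Int))) none
          ++ PySem.List.slice w none (some (loc + 1)) ++ PySem.List.slice l none (some (loc + 1)),
       PySem.List.slice l (some (((PySem.List.slice l none (some (loc + 1))).length : Int))) none) := by
  unfold tie_win
  rw [condSlice_eq w loc, condSlice_eq l loc]

lemma loop_eq (fuel : Nat) :
    ∀ (p1 p2 : List Int) (r : Int),
      (∃ n < fuel, tieCard p1 (3 + (r + n) * 3) ≠ tieCard p2 (3 + (r + n) * 3)) →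
      tieGo fuel p1 p2 r = tieSettle p1 p2 (tieFindLoc fuel p1 p2 (3 + r * 3)) := by
  induction fuel with
  | zero => intro p1 p2 r ⟨n, hn, _⟩; omega
  | succ fuel ih =>
    intro p1 p2 r hex
    set L := 3 + r * 3 with hL
    by_cases heq : tieCard p1 L = tieCard p2 L
    · -- cards tie: both sides step once
      have step1 : tieGo (fuel + 1) p1 p2 r = tieGo fuel p1 p2 (r + 1) := by
        simp only [tieGo, ← hL]
        rw [if_neg (by omega), if_neg (by omega)]
      have step2 : tieFindLoc (fuel + 1) p1 p2 L = tieFindLoc fuel p1 p2 (L + 3) := by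
        simp only [tieFindLoc, if_pos heq]
      have hex' : ∃ n < fuel, tieCard p1 (3 + ((r + 1) + n) * 3) ≠ tieCard p2 (3 + ((r + 1) + n) * 3) := by
        obtain ⟨n, hn, hd⟩ := hex
        rcases n with _ | m
        · exact absurd (by simpa using heq) (by simpa using hd)
        · refine ⟨m, by omega, ?_⟩
          have : 3 + ((r + 1) + (m : Int)) * 3 = 3 + (r + ((m : Nat) + 1 : Nat)) * 3 := by
            push_cast; ring
          rw [this]; exact hd
      rw [step1, step2, show L + 3 = 3 + (r + 1) * 3 by ring]
      exact ih p1 p2 (r + 1) hex'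
    · -- cards differ: both sides settle at L
      have hfind : tieFindLoc (fuel + 1) p1 p2 L = L := by
        simp only [tieFindLoc, if_neg heq]
      rw [hfind]
      rcases lt_trichotomy (tieCard p1 L) (tieCard p2 L) with hlt | heq' | hgt
      · have hgo : tieGo (fuel + 1) p1 p2 r =
            ((tie_win p2 p1 L).2, (tie_win p2 p1 L).1) := by
          simp only [tieGo, ← hL]
          rw [if_neg (by omega), if_pos hlt]
        rw [hgo, tie_win_eq]
        unfold tieSettle
        rw [if_neg (by omega), if_neg (by omega), if_neg (by omega)]
      · exact absurd heq' heq
      · have hgo : tieGo (fuel + 1) p1 p2 r = tie_win p1 p2 L := by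
          simp only [tieGo, ← hL]
          rw [if_pos hgt]
        rw [hgo, tie_win_eq]
        unfold tieSettle
        rw [if_pos (by omega), if_pos (by omega), if_pos (by omega)]

-- ===== VERDICT (by name: the statement is the Claim_ definition above) =====
theorem tie_spec : Claim_equal_tie := by
  intro p1 p2 r _ hpre
  obtain ⟨-, -, -, hex⟩ := hpre
  unfold Spec_tie tie tie_alt
  exact loop_eq (p1.length + p2.length + 1) p1 p2 r hex
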